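-- pv_equiv track=rewrite | github.com/lawang24/competitive-programming-archive | Codeforces/old_code/952/D.py | solve
-- ===== SOURCE A (Python) =====
-- def solve(m, n, grid):
--     heights = []
--     widths = []
--
--     for row in range(m):
--         for col in range(n):
--             if grid[row][col] == "#":
--                 heights.append(str(row+1))
--                 widths.append(str(col+1))
--
--     return heights[len(heights)//2]+ " " +  widths[len(widths)//2]
-- ===== SOURCE B (Python) =====
-- def solve(m, n, grid):
--     # pass 1: count the '#' cells
--     total = 0
--     for row in range(m):
--         for col in range(n):
--             if grid[row][col] == "#":
--                 total += 1
--     target = total // 2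
--     # pass 2: return the target-th '#' cell in the same row-major order
--     idx = 0
--     for row in range(m):
--         for col in range(n):
--             if grid[row][col] == "#":
--                 if idx == target:
--                     return str(row + 1) + " " + str(col + 1)
--                 idx += 1
--     # no '#' cell at all: fall through (outside the stated precondition)
-- ===== Notes on version B (the rewrite author's own statement) =====
-- stated objective: alternative
-- what changed: Instead of materialising two parallel lists of all '#' coordinates and indexing their middle, B counts the '#' cells in one pass and then rescans, returning as soon as the running index reaches count//2, so no lists are built.
import Mathlib
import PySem

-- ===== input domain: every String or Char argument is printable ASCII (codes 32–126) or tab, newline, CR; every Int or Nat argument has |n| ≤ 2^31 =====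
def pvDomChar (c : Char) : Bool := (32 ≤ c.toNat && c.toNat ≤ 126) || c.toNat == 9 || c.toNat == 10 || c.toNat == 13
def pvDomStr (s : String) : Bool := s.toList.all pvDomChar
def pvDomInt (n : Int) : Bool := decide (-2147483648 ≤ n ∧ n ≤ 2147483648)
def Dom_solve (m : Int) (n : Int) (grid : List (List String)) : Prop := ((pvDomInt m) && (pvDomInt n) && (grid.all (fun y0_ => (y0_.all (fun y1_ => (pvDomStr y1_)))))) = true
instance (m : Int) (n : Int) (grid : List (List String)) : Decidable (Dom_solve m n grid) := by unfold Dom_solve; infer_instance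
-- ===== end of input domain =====

-- B counts the '#' cells, then rescans returning the (count//2)-th '#' cell directly; no coordinate lists are built.

-- grid[row][col] == "#"  (none = IndexError, excluded by Pre_; used by both ports)
def pvHit (grid : List (List String)) (row col : Int) : Bool :=
  ((PySem.List.pyGet? grid row).bind (fun r => PySem.List.pyGet? r col)) == some "#"

-- ===== PORT A =====
def solve (m : Int) (n : Int) (grid : List (List String)) : String :=
  let hw : List String × List String :=
    (PySem.List.pyRange 0 m 1).foldl (fun hw row =>
      (PySem.List.pyRange 0 n 1).foldl (fun hw col =>
        if pvHit grid row col then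
          (hw.1 ++ [PySem.Int.toStr (row + 1)], hw.2 ++ [PySem.Int.toStr (col + 1)])
        else hw) hw) ([], [])
  ((PySem.List.pyGet? hw.1 (PySem.Int.floordiv (hw.1.length : Int) 2)).getD "") ++ " " ++
  ((PySem.List.pyGet? hw.2 (PySem.Int.floordiv (hw.2.length : Int) 2)).getD "")

-- ===== PORT B =====
def solve_alt (m : Int) (n : Int) (grid : List (List String)) : String :=
  let total : Int :=
    (PySem.List.pyRange 0 m 1).foldl (fun t row =>
      (PySem.List.pyRange 0 n 1).foldl (fun t col =>
        if pvHit grid row col then t + 1 else t) t) 0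
  let target := PySem.Int.floordiv total 2
  let res : Int × Option String :=
    (PySem.List.pyRange 0 m 1).foldl (fun s row =>
      (PySem.List.pyRange 0 n 1).foldl (fun s col =>
        if pvHit grid row col then
          (if s.2.isSome then s
           else if s.1 = target then
             (s.1, some (PySem.Int.toStr (row + 1) ++ " " ++ PySem.Int.toStr (col + 1)))
           else (s.1 + 1, s.2))
        else s) s) (0, none)
  res.2.getD ""

-- ===== PRECONDITION & SPEC =====
-- Pre_ excludes exactly the inputs where Python A raises: IndexError from grid[row][col]
-- (m rows / n columns not all present) or from indexing the empty coordinate lists (no '#' cell).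
def Pre_solve (m : Int) (n : Int) (grid : List (List String)) : Prop :=
  m ≤ (grid.length : Int) ∧
  (∀ row ∈ grid.take m.toNat, n ≤ (row.length : Int)) ∧
  (∃ r ∈ grid.take m.toNat, "#" ∈ r.take n.toNat)
instance (m : Int) (n : Int) (grid : List (List String)) : Decidable (Pre_solve m n grid) := by
  unfold Pre_solve; infer_instance
def pvWitness_solve : Int × Int × List (List String) := (1, 1, [["#"]])

def Spec_solve (m : Int) (n : Int) (grid : List (List String)) (out : String) : Prop := out = solve_alt m n grid
instance (m : Int) (n : Int) (grid : List (List String)) (out : String) : Decidable (Spec_solve m n grid out) := by unfold Spec_solve; infer_instance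

-- ===== CLAIM (what is proved, stated in full; the proofs are below) =====
def Claim_equal_solve : Prop := ∀ (m : Int) (n : Int) (grid : List (List String)), Dom_solve m n grid → Pre_solve m n grid → Spec_solve m n grid (solve m n grid)

-- ===== LEMMAS AND PROOFS =====

-- the row-major list of scanned (row, col) pairs
def pvPairs (m n : Int) : List (Int × Int) :=
  (PySem.List.pyRange 0 m 1).flatMap (fun r => (PySem.List.pyRange 0 n 1).map (fun c => (r, c)))

theorem pv_foldl_nested {α β σ : Type} (l1 : List α) (l2 : List β) (f : σ → α → β → σ) (s : σ) :
    l1.foldl (fun s a => l2.foldl (fun s b => f s a b) s) s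
      = (l1.flatMap (fun a => l2.map (fun b => (a, b)))).foldl (fun s p => f s p.1 p.2) s := by
  induction l1 generalizing s with
  | nil => rfl
  | cons a l ih => simp [List.foldl_append, List.foldl_map, ih]

theorem pv_foldA (grid : List (List String)) (l : List (Int × Int)) (h0 w0 : List String) :
    l.foldl (fun hw p => if pvHit grid p.1 p.2 then
        (hw.1 ++ [PySem.Int.toStr (p.1 + 1)], hw.2 ++ [PySem.Int.toStr (p.2 + 1)]) else hw) (h0, w0)
      = (h0 ++ (l.filter (fun p => pvHit grid p.1 p.2)).map (fun p => PySem.Int.toStr (p.1 + 1)),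
         w0 ++ (l.filter (fun p => pvHit grid p.1 p.2)).map (fun p => PySem.Int.toStr (p.2 + 1))) := by
  induction l generalizing h0 w0 with
  | nil => simp
  | cons a l ih =>
    by_cases h : pvHit grid a.1 a.2 <;> simp [h, ih]

theorem pv_count (grid : List (List String)) (l : List (Int × Int)) (t : Int) :
    l.foldl (fun t p => if pvHit grid p.1 p.2 then t + 1 else t) t
      = t + ((l.filter (fun p => pvHit grid p.1 p.2)).length : Int) := by
  induction l generalizing t with
  | nil => simp
  | cons a l ih =>
    by_cases h : pvHit grid a.1 a.2 <;> simp [h, ih] <;> ring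

-- once a result is found the scan state is frozen
theorem pv_scan_frozen (fmt : Int × Int → String) (target : Int) (l : List (Int × Int)) (i : Int) (v : String) :
    l.foldl (fun (s : Int × Option String) p =>
        if s.2.isSome then s
        else if s.1 = target then (s.1, some (fmt p))
        else (s.1 + 1, s.2)) (i, some v) = (i, some v) := by
  induction l with
  | nil => rfl
  | cons a l ih => simpa using ih

theorem pv_scan (fmt : Int × Int → String) (target : Int) (l : List (Int × Int)) (i : Int)
    (hi : i ≤ target) :
    (l.foldl (fun (s : Int × Option String) p =>
        if s.2.isSome then s
        else if s.1 = target then (s.1, some (fmt p))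
        else (s.1 + 1, s.2)) (i, none)).2
      = (l[(target - i).toNat]?).map fmt := by
  induction l generalizing i with
  | nil => simp
  | cons a l ih =>
    by_cases h : i = target
    · subst h
      simp [pv_scan_frozen]
    · have h1 : i + 1 ≤ target := by omega
      have h2 : (target - i).toNat = (target - (i + 1)).toNat + 1 := by omega
      simp only [List.foldl_cons, Option.isSome_none, Bool.false_eq_true, if_false, h, if_neg h]
      rw [ih (i + 1) h1, h2]
      simp

-- Pre_ gives a '#' cell among the scanned pairs
theorem pv_nonempty (m n : Int) (grid : List (List String)) (h : Pre_solve m n grid) :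
    (pvPairs m n).filter (fun p => pvHit grid p.1 p.2) ≠ [] := by
  obtain ⟨-, -, r, hr, hsh⟩ := h
  obtain ⟨ri, hri, hrget⟩ := List.getElem_of_mem hr
  obtain ⟨ci, hci, hcget⟩ := List.getElem_of_mem hsh
  rw [List.getElem_take] at hrget hcget
  have hril : ri < grid.length := lt_of_lt_of_le hri (by simpa using List.length_take_le _ _)
  have hcil : ci < r.length := lt_of_lt_of_le hci (by simpa using List.length_take_le _ _)
  have hrm : ri < m.toNat := lt_of_lt_of_le hri (by simpa using List.length_take_le' _ _)
  have hcn : ci < n.toNat := lt_of_lt_of_le hci (by simpa using List.length_take_le' _ _)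
  have hhit : pvHit grid (ri : Int) (ci : Int) = true := by
    simp only [pvHit, PySem.List.pyGet?_natCast]
    rw [List.getElem?_eq_getElem hril, hrget]
    simp only [Option.bind_some, PySem.List.pyGet?_natCast]
    rw [List.getElem?_eq_getElem hcil, hcget]
    simp
  have hmem : ((ri : Int), (ci : Int)) ∈ pvPairs m n := by
    simp only [pvPairs, List.mem_flatMap, List.mem_map]
    exact ⟨(ri : Int), by rw [PySem.List.mem_pyRange_one]; omega,
           (ci : Int), by rw [PySem.List.mem_pyRange_one]; omega, rfl⟩
  intro hnil
  have := List.filter_eq_nil_iff.mp hnil _ hmem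
  simp [hhit] at this

theorem pv_floordiv_len (k : Nat) : PySem.Int.floordiv (k : Int) 2 = ((k / 2 : Nat) : Int) := by
  exact_mod_cast PySem.Int.floordiv_natCast k 2

-- ===== VERDICT (by name: the statement is the Claim_ definition above) =====
theorem solve_spec : Claim_equal_solve := by
  intro m n grid _ hpre
  simp only [Spec_solve, solve, solve_alt]
  rw [pv_foldl_nested, pv_foldl_nested, pv_foldl_nested]
  rw [show ((PySem.List.pyRange 0 m 1).flatMap (fun r => (PySem.List.pyRange 0 n 1).map (fun c => (r, c)))) = pvPairs m n from rfl]
  rw [pv_foldA, pv_count]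
  simp only [List.nil_append, List.length_map, Int.zero_add]
  rw [pv_floordiv_len]
  set L := (pvPairs m n).filter (fun p => pvHit grid p.1 p.2) with hL
  have hne : L ≠ [] := pv_nonempty m n grid hpre
  have hlen : 0 < L.length := List.length_pos_iff.mpr hne
  rw [PySem.List.foldl_if_eq_foldl_filter, ← hL]
  rw [pv_scan (fun p => PySem.Int.toStr (p.1 + 1) ++ " " ++ PySem.Int.toStr (p.2 + 1))
        ((L.length / 2 : Nat) : Int) L 0 (by positivity)]
  have hk : L.length / 2 < L.length := Nat.div_lt_self hlen (by norm_num)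
  have hsub : (((L.length / 2 : Nat) : Int) - 0).toNat = L.length / 2 := by omega
  rw [hsub]
  simp only [PySem.List.pyGet?_natCast, List.getElem?_map, List.getElem?_eq_getElem hk]
  simp
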